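-- pv_equiv track=rewrite | github.com/Alanhsiu/CLAPS | model.py | did2rng
-- ===== SOURCE A (Python) =====
-- def did2rng(did):
--     rngs = []
--     s = 0
--     e = 1
--     prev_did = did[0]
--     for i in range(len(did)):
--         if prev_did != did[i]:
--             e = i
--             rngs.append([s, e])
--             s = e
--         if i == len(did)-1:
--             rngs.append([s, len(did)])
--         prev_did = did[i]
--     assert rngs[0][0] == 0
--     assert rngs[-1][1] == len(did)
--     for i in range(len(rngs)-1):
--         assert rngs[i][1] == rngs[i+1][0]
--     return rngs
-- ===== SOURCE B (Python) =====
-- def did2rng(did):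
--     n = len(did)
--     rngs = []
--     s = 0
--     while s < n:
--         v = did[s]
--         j = s + 1
--         while j < n and did[j] == v:
--             j += 1
--         rngs.append([s, j])
--         s = j
--     return rngs
-- ===== Notes on version B (the rewrite author's own statement) =====
-- stated objective: alternative
-- what changed: B is a two-pointer run scanner: an outer while-loop jumps the start pointer from run start to run end and an inner while-loop extends the end pointer while elements equal the run's head, instead of A's single for-loop over all indices that compares each element to its predecessor and appends ranges in-flight with trailing assertions.
import Mathlib
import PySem

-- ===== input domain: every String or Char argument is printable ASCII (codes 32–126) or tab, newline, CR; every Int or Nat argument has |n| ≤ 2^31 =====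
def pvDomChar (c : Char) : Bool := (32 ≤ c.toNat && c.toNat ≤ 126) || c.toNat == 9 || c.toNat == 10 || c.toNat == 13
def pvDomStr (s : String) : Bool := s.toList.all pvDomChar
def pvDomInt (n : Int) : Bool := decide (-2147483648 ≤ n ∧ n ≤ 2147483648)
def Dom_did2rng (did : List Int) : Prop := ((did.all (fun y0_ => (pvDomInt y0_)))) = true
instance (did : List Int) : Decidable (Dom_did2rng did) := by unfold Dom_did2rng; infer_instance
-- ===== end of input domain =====

-- B is a two-pointer run scanner (outer loop jumps start→end of each run found
-- by an inner loop comparing to the run's head) instead of A's single for-loop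
-- tracking the previous element; equal return values on nonempty input.


-- ===== PORT A =====
-- A's for-loop over range(len(did)) as structural recursion over the remaining
-- suffix carrying the same state (i, prev_did, s, rngs); the variable `e` is only
-- ever assigned `i` immediately before use, so `i` stands for it.  The trailing
-- asserts always hold and never raise, so they contribute nothing to the value.
def did2rngGo (n : Int) : List Int → Int → Int → Int → List (List Int) → List (List Int)
  | [], _, _, _, rngs => rngs
  | x :: xs, i, prev, s, rngs =>
    let s' : Int := if prev ≠ x then i else s
    let rngs1 : List (List Int) := if prev ≠ x then rngs ++ [[s, i]] else rngs
    let rngs2 : List (List Int) := if i = n - 1 then rngs1 ++ [[s', n]] else rngs1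
    did2rngGo n xs (i + 1) x s' rngs2

def did2rng (did : List Int) : List (List Int) :=
  match did with
  | [] => []          -- unreachable under Pre_did2rng: Python raises IndexError reading the first element
  | d0 :: _ => did2rngGo (did.length : Int) did 0 d0 0 []

-- ===== PORT B =====
-- inner while loop `while j < n and did[j] == v: j += 1`; the fuel argument is
-- only a totality guard (n+1 steps always suffice), the loop body is unchanged.
def runEnd (did : List Int) (v : Int) : Nat → Int → Int
  | 0, j => j
  | Nat.succ fuel, j =>
    if j < (did.length : Int) ∧ PySem.List.pyGet? did j = some v then
      runEnd did v fuel (j + 1)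
    else j

-- outer while loop `while s < n: … rngs.append([s, j]); s = j`; fuel again only
-- a totality guard (each iteration starts a new run, so n+1 steps suffice).
def goB (did : List Int) : Nat → Int → List (List Int) → List (List Int)
  | 0, _, rngs => rngs
  | Nat.succ fuel, s, rngs =>
    if s < (did.length : Int) then
      let v := PySem.List.pyGetD did s 0  -- did[s]; in range: 0 ≤ s < len throughout
      let j := runEnd did v (did.length + 1) (s + 1)
      goB did fuel j (rngs ++ [[s, j]])
    else rngs

def did2rng_alt (did : List Int) : List (List Int) := goB did (did.length + 1) 0 []

-- ===== PRECONDITION & SPEC =====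
-- Pre_ excludes only the empty list, on which Python A raises IndexError at its initial read of the first element.
def Pre_did2rng (did : List Int) : Prop := did ≠ []
instance (did : List Int) : Decidable (Pre_did2rng did) := by unfold Pre_did2rng; infer_instance
def pvWitness_did2rng : List Int := [1, 1, 2]

def Spec_did2rng (did : List Int) (out : List (List Int)) : Prop := out = did2rng_alt did
instance (did : List Int) (out : List (List Int)) : Decidable (Spec_did2rng did out) := by unfold Spec_did2rng; infer_instance

-- ===== CLAIM (what is proved, stated in full; the proofs are below) =====
def Claim_equal_did2rng : Prop := ∀ (did : List Int), Dom_did2rng did → Pre_did2rng did → Spec_did2rng did (did2rng did)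

-- ===== LEMMAS AND PROOFS =====

-- proof-side vocabulary: the list of run boundaries of a suffix, and pairing of
-- consecutive boundaries.  Both ports are shown equal to the paired boundaries.
def boundsGo : List Int → Int → Int → List Int
  | [], _, _ => []
  | x :: xs, i, prev => (if x ≠ prev then [i] else []) ++ boundsGo xs (i + 1) x

def pairUp : List Int → List (List Int)
  | a :: b :: rest => [a, b] :: pairUp (b :: rest)
  | _ => []

lemma pairUp_cons_cons (a b : Int) (rest : List Int) :
    pairUp (a :: b :: rest) = [a, b] :: pairUp (b :: rest) := rfl

-- A-side loop invariant.
lemma did2rngGo_eq (n : Int) :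
    ∀ (l : List Int) (i prev s : Int) (rngs : List (List Int)),
      l ≠ [] → i + (l.length : Int) = n →
      did2rngGo n l i prev s rngs = rngs ++ pairUp ((s :: boundsGo l i prev) ++ [n]) := by
  intro l
  induction l with
  | nil => intro _ _ _ _ h _; exact absurd rfl h
  | cons x xs ih =>
    intro i prev s rngs _ hlen
    simp only [List.length_cons] at hlen
    cases xs with
    | nil =>
      have hi : i = n - 1 := by simp at hlen; omega
      by_cases hpx : prev = x
      · simp [did2rngGo, boundsGo, pairUp, hpx, hi]
      · have hxp : x ≠ prev := fun h => hpx h.symm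
        simp [did2rngGo, boundsGo, pairUp, hpx, hxp, hi]
    | cons y ys =>
      have hi : i ≠ n - 1 := by simp at hlen ⊢; omega
      have hlen' : (i + 1) + ((y :: ys).length : Int) = n := by
        simp at hlen ⊢; omega
      rw [did2rngGo]
      by_cases hpx : prev = x
      · simp only [ne_eq, hpx, not_true_eq_false, if_false, if_neg hi]
        rw [ih (i + 1) x s rngs (by simp) hlen']
        simp [boundsGo]
      · have hxp : x ≠ prev := fun h => hpx h.symm
        simp only [ne_eq, hpx, not_false_eq_true, if_true, if_neg hi]
        rw [ih (i + 1) x i (rngs ++ [[s, i]]) (by simp) hlen']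
        simp only [boundsGo, hxp, ne_eq, not_false_eq_true, if_true, List.cons_append,
          List.nil_append]
        rw [pairUp_cons_cons]
        simp

-- the inner while loop measures the length of the run of v starting at j.
lemma runEnd_char (did : List Int) :
    ∀ (xs : List Int) (fuel : Nat) (x j : Int), 0 ≤ j → xs.length < fuel →
      did.drop j.toNat = xs →
      runEnd did x fuel j = j + ((xs.takeWhile (fun y => y == x)).length : Int) := by
  intro xs
  induction xs with
  | nil =>
    intro fuel x j hj hfuel hdrop
    have hlen : did.length ≤ j.toNat := by
      simpa [List.drop_eq_nil_iff] using hdrop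
    match fuel, hfuel with
    | Nat.succ f, _ =>
      rw [runEnd, if_neg (by rintro ⟨h2, -⟩; omega)]
      simp
  | cons y ys ih =>
    intro fuel x j hj hfuel hdrop
    have hjl : j.toNat < did.length := by
      by_contra h
      have hnil : did.drop j.toNat = [] := List.drop_eq_nil_iff.mpr (by omega)
      rw [hnil] at hdrop
      exact absurd hdrop (by simp)
    have hget : PySem.List.pyGet? did j = some y := by
      rw [PySem.List.pyGet?_of_nonneg did hj]
      have : did[j.toNat + 0]? = some y := by
        rw [← List.getElem?_drop, hdrop]; rfl
      simpa using this
    have hdrop' : did.drop (j + 1).toNat = ys := by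
      have h1 : (j + 1).toNat = j.toNat + 1 := by omega
      rw [h1, ← List.drop_drop, hdrop]
      rfl
    match fuel, hfuel with
    | Nat.succ f, hfuel =>
      by_cases hyx : y = x
      · rw [runEnd, if_pos ⟨by omega, by rw [hget, hyx]⟩]
        rw [ih f x (j + 1) (by omega) (by simp at hfuel ⊢; omega) hdrop']
        rw [List.takeWhile_cons_of_pos (p := fun y => y == x) (by simp [hyx])]
        simp
        omega
      · rw [runEnd, if_neg (by
          rintro ⟨-, h⟩; rw [hget] at h; exact absurd (Option.some.inj h) hyx)]
        simp [List.takeWhile_cons_of_neg (p := fun y => y == x) (by simpa using hyx)]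

-- dropping the taken run leaves the dropWhile suffix
lemma drop_length_takeWhile (p : Int → Bool) (xs : List Int) :
    xs.drop (xs.takeWhile p).length = xs.dropWhile p := by
  nth_rewrite 2 [← List.takeWhile_append_dropWhile (p := p) (l := xs)]
  rw [List.drop_left]

lemma dropWhile_head_false (p : Int → Bool) :
    ∀ (xs : List Int) (z : Int) (zs : List Int), xs.dropWhile p = z :: zs → p z = false := by
  intro xs
  induction xs with
  | nil => intro z zs h; simp [List.dropWhile] at h
  | cons y ys ih =>
    intro z zs h
    by_cases hy : p y
    · rw [List.dropWhile_cons_of_pos hy] at h; exact ih z zs h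
    · rw [List.dropWhile_cons_of_neg hy] at h
      cases h; simpa using hy

-- boundsGo skips an initial run of its carried element
lemma boundsGo_skip_run (x : Int) :
    ∀ (xs : List Int) (i : Int),
      boundsGo xs i x
        = boundsGo (xs.dropWhile (fun y => y == x)) (i + ((xs.takeWhile (fun y => y == x)).length : Int)) x := by
  intro xs
  induction xs with
  | nil => intro i; simp [boundsGo]
  | cons y ys ih =>
    intro i
    by_cases hyx : y = x
    · rw [boundsGo]
      simp only [hyx, ne_eq, not_true_eq_false, if_false, List.nil_append]
      rw [List.dropWhile_cons_of_pos (by simp), List.takeWhile_cons_of_pos (by simp)]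
      rw [ih (i + 1)]
      congr 1
      simp; omega
    · rw [List.dropWhile_cons_of_neg (by simp [hyx]), List.takeWhile_cons_of_neg (by simp [hyx])]
      simp

-- the outer loop stops as soon as its index reaches the length, whatever fuel is left
lemma goB_end (did : List Int) (fuel : Nat) (j : Int) (rngs : List (List Int))
    (h : (did.length : Int) ≤ j) : goB did fuel j rngs = rngs := by
  cases fuel with
  | zero => rfl
  | succ f => rw [goB, if_neg (by omega)]

-- B-side loop invariant: the outer loop on a nonempty suffix emits the paired
-- boundaries of that suffix after the already-emitted ranges.
lemma goB_inv :
    ∀ (k : Nat) (did : List Int) (fuel : Nat) (s x : Int) (xs : List Int) (rngs : List (List Int)),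
      xs.length = k → 0 ≤ s → xs.length < fuel → did.drop s.toNat = x :: xs →
      goB did fuel s rngs = rngs ++ pairUp ((s :: boundsGo xs (s + 1) x) ++ [(did.length : Int)]) := by
  intro k
  induction k using Nat.strong_induction_on with
  | _ k ih =>
    intro did fuel s x xs rngs hk hs hfuel hdrop
    have hlen : did.length = s.toNat + 1 + xs.length := by
      have := congrArg List.length hdrop
      simp [List.length_drop] at this
      omega
    have hslt : s < (did.length : Int) := by omega
    have hv : PySem.List.pyGetD did s 0 = x := by
      have h0 : did[s.toNat + 0]? = some x := by
        rw [← List.getElem?_drop, hdrop]; rfl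
      have h0' : did[s.toNat]? = some x := by simpa using h0
      rw [PySem.List.pyGetD_eq_getElem did 0 hs (by omega)]
      rw [List.getElem?_eq_getElem (by omega)] at h0'
      exact Option.some.inj h0'
    have hdrop1 : did.drop (s + 1).toNat = xs := by
      have h1 : (s + 1).toNat = s.toNat + 1 := by omega
      rw [h1, ← List.drop_drop, hdrop]
      rfl
    have hrun : runEnd did x (did.length + 1) (s + 1)
        = (s + 1) + ((xs.takeWhile (fun y => y == x)).length : Int) :=
      runEnd_char did xs (did.length + 1) x (s + 1) (by omega) (by omega) hdrop1
    have htle : (xs.takeWhile (fun y => y == x)).length ≤ xs.length :=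
      (List.takeWhile_sublist _).length_le
    match fuel, hfuel with
    | Nat.succ f, hfuel =>
      rw [goB, if_pos hslt]
      simp only [hv, hrun]
      have hbg := boundsGo_skip_run x xs (s + 1)
      have hdropt : xs.drop (xs.takeWhile (fun y => y == x)).length
          = xs.dropWhile (fun y => y == x) := drop_length_takeWhile _ xs
      cases hrest : xs.dropWhile (fun y => y == x) with
      | nil =>
        have htx : (xs.takeWhile (fun y => y == x)).length = xs.length := by
          have := congrArg List.length hdropt
          simp [hrest] at this
          omega
        have hjn : (s + 1) + ((xs.takeWhile (fun y => y == x)).length : Int)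
            = (did.length : Int) := by omega
        rw [hbg, hrest]
        simp only [boundsGo]
        rw [goB_end did f _ _ (by omega)]
        simp [pairUp, hjn]
      | cons z zs =>
        have hzx : z ≠ x := by
          have := dropWhile_head_false (fun y => y == x) xs z zs hrest
          simpa using this
        have htb : (xs.takeWhile (fun y => y == x)).length + 1 + zs.length = xs.length := by
          have := congrArg List.length hdropt
          simp [hrest] at this
          omega
        have hdropj :
            did.drop ((s + 1) + ((xs.takeWhile (fun y => y == x)).length : Int)).toNat
              = z :: zs := by
          have h1 : ((s + 1) + ((xs.takeWhile (fun y => y == x)).length : Int)).toNat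
              = (s + 1).toNat + (xs.takeWhile (fun y => y == x)).length := by omega
          rw [h1, ← List.drop_drop, hdrop1, hdropt, hrest]
        have hstep := ih zs.length (by omega) did f
          ((s + 1) + ((xs.takeWhile (fun y => y == x)).length : Int)) z zs
          (rngs ++ [[s, (s + 1) + ((xs.takeWhile (fun y => y == x)).length : Int)]])
          rfl (by omega) (by omega) hdropj
        rw [hstep, hbg, hrest]
        simp only [boundsGo, hzx, ne_eq, not_false_eq_true, if_true, List.cons_append,
          List.nil_append]
        rw [pairUp_cons_cons]
        simp only [List.append_assoc, List.singleton_append]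

-- ===== VERDICT (by name: the statement is the Claim_ definition above) =====
theorem did2rng_spec : Claim_equal_did2rng := by
  intro did _ hpre
  unfold Spec_did2rng
  match did with
  | [] => exact absurd rfl hpre
  | d0 :: rest =>
    show did2rngGo (((d0 :: rest).length : Nat) : Int) (d0 :: rest) 0 d0 0 []
        = did2rng_alt (d0 :: rest)
    rw [did2rngGo_eq (((d0 :: rest).length : Nat) : Int) (d0 :: rest) 0 d0 0 [] (by simp) (by simp)]
    unfold did2rng_alt
    rw [goB_inv rest.length (d0 :: rest) ((d0 :: rest).length + 1) 0 d0 rest [] rfl le_rfl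
      (by simp) (by simp)]
    simp [boundsGo]
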